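-- pv_equiv track=rewrite | github.com/syj-student/Study | problem/programmers/lv3/110옮기기.py | solution
-- ===== SOURCE A (Python) =====
-- def solution(s):
--     def extract110(frag):
--         cnt = 0
--         while (frag_len := len((new_frag := frag.split("110")))) != 1:
--             cnt += frag_len - 1
--             frag = "".join(new_frag)
--         return frag, cnt
--
--     def insert110(l):
--         frag, cnt = extract110(l)
--         acc = "110" * cnt
--         idx = frag.rfind("0")
--         if idx == -1:
--             return acc + frag
--         return frag[:idx+1] + acc + frag[idx+1:]
--
--     answer = []
--     for l in s:
--         answer.append(insert110(l))
--     return answer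
-- ===== SOURCE B (Python) =====
-- def solution(s):
--     res = []
--     for l in s:
--         stack = []
--         cnt = 0
--         for c in l:
--             if c == '0' and len(stack) >= 2 and stack[-1] == '1' and stack[-2] == '1':
--                 stack.pop()
--                 stack.pop()
--                 cnt += 1
--             else:
--                 stack.append(c)
--         frag = ''.join(stack)
--         i = len(frag)
--         while i > 0 and frag[i-1] != '0':
--             i -= 1
--         res.append(frag[:i] + "110" * cnt + frag[i:])
--     return res
-- ===== Notes on version B (the rewrite author's own statement) =====
-- stated objective: alternative
-- what changed: Replaces the repeated split("110")/join passes (re-scanning the shrinking string until no "110" remains) with a single left-to-right stack pass that pops a '1','1' pair when a '0' arrives and counts the pops, then reinserts "110"*cnt after the last '0' found by one backward scan; single-pass O(n) worst case versus A's O(n^2) worst case, but not measurably faster on the generated inputs (A's passes run in C).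
import Mathlib
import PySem

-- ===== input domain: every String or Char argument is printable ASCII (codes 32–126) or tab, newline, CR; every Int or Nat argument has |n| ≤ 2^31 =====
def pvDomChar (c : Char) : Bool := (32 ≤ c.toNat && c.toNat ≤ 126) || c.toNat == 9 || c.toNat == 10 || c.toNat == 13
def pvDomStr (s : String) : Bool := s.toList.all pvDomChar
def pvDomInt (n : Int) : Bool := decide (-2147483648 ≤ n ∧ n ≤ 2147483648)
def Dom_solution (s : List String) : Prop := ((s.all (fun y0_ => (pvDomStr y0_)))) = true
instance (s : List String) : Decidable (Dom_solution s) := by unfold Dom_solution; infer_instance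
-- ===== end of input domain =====

-- B replaces A's repeated split("110")/join passes by one stack pass that pops '1','1','0' triples
-- and counts them, then one backward scan to find the last '0' (a different, single-pass algorithm).

-- ===== PORT A =====
-- the while loop, with a fuel guard for totality only: each pass that splits off k ≥ 2 pieces
-- shortens frag by 3*(k-1) ≥ 3, so fuel = len(frag) + 1 is never exhausted (extractA_eq_run).
def extract110A : List Char → Int → Nat → List Char × Int
  | frag, cnt, 0 => (frag, cnt)
  | frag, cnt, fuel + 1 =>
    let new_frag := PySem.Chars.splitOn frag ['1','1','0']
    if new_frag.length ≠ 1 then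
      extract110A (PySem.Chars.join [] new_frag) (cnt + (new_frag.length - 1)) fuel
    else
      (frag, cnt)

def insert110A (l : List Char) : List Char :=
  let fc := extract110A l 0 (l.length + 1)
  let acc := PySem.List.pyRepeat ['1','1','0'] fc.2
  let idx := PySem.Chars.rfind fc.1 ['0']
  if idx = -1 then acc ++ fc.1
  else PySem.Chars.slice fc.1 none (some (idx + 1)) ++ acc ++ PySem.Chars.slice fc.1 (some (idx + 1)) none

def solution (s : List String) : List String :=
  s.map (fun l => String.ofList (insert110A l.toList))

-- ===== PORT B =====
def isTop11 : List Char → Bool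
  | a :: b :: _ => a = '1' && b = '1'
  | _ => false

-- c == '0' and stack[-1] == '1' and stack[-2] == '1' → pop twice, count; else push
def stepB (st : List Char × Int) (c : Char) : List Char × Int :=
  if c = '0' ∧ isTop11 st.1 then (st.1.drop 2, st.2 + 1) else (c :: st.1, st.2)

-- i = len(frag); while i > 0 and frag[i-1] != '0': i -= 1
def findCut (frag : List Char) : Nat → Nat
  | 0 => 0
  | i + 1 => if frag[i]? ≠ some '0' then findCut frag i else i + 1

def insert110B (l : List Char) : List Char :=
  let r := l.foldl stepB ([], 0)
  let frag := r.1.reverse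
  let i := findCut frag frag.length
  -- frag[:i] / frag[i:] with 0 ≤ i ≤ len frag are exactly take/drop
  frag.take i ++ PySem.List.pyRepeat ['1','1','0'] r.2 ++ frag.drop i

def solution_alt (s : List String) : List String :=
  s.map (fun l => String.ofList (insert110B l.toList))

-- ===== PRECONDITION & SPEC =====
def Spec_solution (s : List String) (out : List String) : Prop := out = solution_alt s
instance (s : List String) (out : List String) : Decidable (Spec_solution s out) := by unfold Spec_solution; infer_instance

-- ===== CLAIM (what is proved, stated in full; the proofs are below) =====
def Claim_equal_solution : Prop := ∀ (s : List String), Dom_solution s → Spec_solution s (solution s)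

-- ===== LEMMAS AND PROOFS =====

-- sp110 is a reference form of PySem.Chars.splitOn for the fixed separator "110".
def sp110 : List Char → List Char → List (List Char)
  | l, cur =>
    if h : ['1','1','0'].isPrefixOf l then
      cur.reverse :: sp110 (l.drop 3) []
    else
      match l with
      | [] => [cur.reverse]
      | c :: rest => sp110 rest (c :: cur)
termination_by l _ => l.length
decreasing_by
  · have h3 : 3 ≤ l.length := (List.isPrefixOf_iff_prefix.mp h).length_le
    simp; omega
  · simp

theorem sp110_ne_nil (l cur : List Char) : sp110 l cur ≠ [] := by
  induction l, cur using sp110.induct with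
  | case1 l cur h ih => rw [sp110]; simp [h]
  | case2 cur h => rw [sp110]; simp [h]
  | case3 cur a rest h ih => rw [sp110, dif_neg h]; exact ih

theorem intercalate_cons_ne (sep a b : List Char) (ps : List (List Char)) :
    List.intercalate sep (a :: b :: ps) = a ++ sep ++ List.intercalate sep (b :: ps) := by
  simp [List.intercalate, List.intersperse]

theorem splitOn_go_eq_sp110 (fuel : Nat) (l cur : List Char) (acc : List (List Char))
    (hf : l.length < fuel) :
    PySem.Chars.splitOn.go ['1','1','0'] fuel l cur acc = acc.reverse ++ sp110 l cur := by
  induction fuel generalizing l cur acc with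
  | zero => omega
  | succ fuel ih =>
    cases l with
    | nil =>
      rw [PySem.Chars.splitOn.go]
      · rw [sp110]
        have : ¬ (['1','1','0'].isPrefixOf ([] : List Char) = true) := by decide
        rw [dif_neg this]; simp
      · omega
    | cons c rest =>
      rw [PySem.Chars.splitOn.go]
      by_cases hp : ['1','1','0'].isPrefixOf (c :: rest) = true
      · rw [if_pos hp]
        rw [ih _ _ _ (by simp at hf ⊢; omega)]
        conv_rhs => rw [sp110]
        rw [dif_pos hp]
        simp
      · rw [if_neg hp]
        rw [ih _ _ _ (by simp at hf ⊢; omega)]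
        conv_rhs => rw [sp110]
        rw [dif_neg hp]

theorem splitOn110_eq (l : List Char) :
    PySem.Chars.splitOn l ['1','1','0'] = sp110 l [] := by
  rw [PySem.Chars.splitOn, splitOn_go_eq_sp110 _ _ _ _ (by omega)]
  simp

theorem flatten_sp110_length (l cur : List Char) :
    (sp110 l cur).flatten.length + 3 * ((sp110 l cur).length - 1) = cur.length + l.length := by
  induction l, cur using sp110.induct with
  | case1 l cur h ih =>
    rw [sp110, dif_pos h]
    have h3 : 3 ≤ l.length := (List.isPrefixOf_iff_prefix.mp h).length_le
    have hne := sp110_ne_nil (l.drop 3) ([] : List Char)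
    have hlen : 0 < (sp110 (l.drop 3) []).length := List.length_pos_iff.mpr hne
    simp only [List.length_nil, List.length_drop, Nat.zero_add] at ih
    simp only [List.flatten_cons, List.length_append, List.length_cons, List.length_reverse]
    omega
  | case2 cur h => rw [sp110, dif_neg h]; simp
  | case3 cur a rest h ih =>
    rw [sp110, dif_neg h]
    simp only [List.length_cons] at ih ⊢
    omega

theorem join_nil_eq_flatten (ps : List (List Char)) :
    PySem.Chars.join [] ps = ps.flatten := by
  rw [PySem.Chars.join]
  induction ps with
  | nil => simp [List.intercalate]
  | cons p ps ih =>
    cases ps with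
    | nil => simp [List.intercalate, List.intersperse]
    | cons q ps' => rw [intercalate_cons_ne] at *; simp at *; exact ih

theorem join_split_lt (frag : List Char)
    (h : (PySem.Chars.splitOn frag ['1','1','0']).length ≠ 1) :
    (PySem.Chars.join [] (PySem.Chars.splitOn frag ['1','1','0'])).length < frag.length := by
  rw [splitOn110_eq] at *
  rw [join_nil_eq_flatten]
  have hlen := flatten_sp110_length frag []
  have hne := sp110_ne_nil frag ([] : List Char)
  have hpos : 0 < (sp110 frag []).length := List.length_pos_iff.mpr hne
  simp only [List.length_nil, Nat.zero_add] at hlen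
  omega

theorem intercalate_sp110 (l cur : List Char) :
    List.intercalate ['1','1','0'] (sp110 l cur) = cur.reverse ++ l := by
  induction l, cur using sp110.induct with
  | case1 l cur h ih =>
    rw [sp110, dif_pos h]
    obtain ⟨b, ps, hb⟩ := List.exists_cons_of_ne_nil (sp110_ne_nil (l.drop 3) [])
    rw [hb, intercalate_cons_ne, ← hb, ih]
    obtain ⟨t, ht⟩ := List.isPrefixOf_iff_prefix.mp h
    subst ht; simp
  | case2 cur h => rw [sp110, dif_neg h]; simp [List.intercalate, List.intersperse]
  | case3 cur a rest h ih => rw [sp110, dif_neg h, ih]; simp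


theorem sp110_len_one' (l cur : List Char) (h : (sp110 l cur).length = 1) :
    ¬ (['1','1','0'] <:+: l) := by
  induction l, cur using sp110.induct with
  | case1 l cur hp ih =>
    rw [sp110, dif_pos hp] at h
    have hne := sp110_ne_nil (l.drop 3) ([] : List Char)
    have := List.length_pos_iff.mpr hne
    simp only [List.length_cons] at h
    omega
  | case2 cur hp => simp
  | case3 cur a rest hp ih =>
    rw [sp110, dif_neg hp] at h
    intro hinf
    rcases List.infix_cons_iff.mp hinf with hpre | hinf'
    · exact hp (List.isPrefixOf_iff_prefix.mpr hpre)
    · exact (ih h) hinf'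

theorem sp110_len_one {l : List Char} (h : (sp110 l []).length = 1) :
    ¬ (['1','1','0'] <:+: l) := sp110_len_one' l [] h

theorem isTop11_shape (stk : List Char) (h : isTop11 stk = true) :
    ∃ s', stk = '1' :: '1' :: s' := by
  match stk with
  | [] => simp [isTop11] at h
  | [a] => simp [isTop11] at h
  | a :: b :: s' =>
    simp only [isTop11, Bool.and_eq_true, decide_eq_true_eq] at h
    exact ⟨s', by rw [h.1, h.2]⟩

-- a run of stepB over a "110"-free string only pushes
theorem run_irreducible (frag : List Char) (stk : List Char) (cnt : Int)
    (h : ¬ (['1','1','0'] <:+: (stk.reverse ++ frag))) :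
    frag.foldl stepB (stk, cnt) = (frag.reverse ++ stk, cnt) := by
  induction frag generalizing stk cnt with
  | nil => simp
  | cons c rest ih =>
    have hpush : stepB (stk, cnt) c = (c :: stk, cnt) := by
      rw [stepB]
      rw [if_neg]
      rintro ⟨hc, htop⟩
      obtain ⟨s', hs⟩ := isTop11_shape stk htop
      subst hc hs
      exact h ⟨s'.reverse, rest, by simp⟩
    rw [List.foldl_cons, hpush, ih (c :: stk) cnt (by simpa using h)]
    simp

-- the count accumulator is a pure offset
theorem run_shift (xs : List Char) (stk : List Char) (c : Int) :
    xs.foldl stepB (stk, c) = ((xs.foldl stepB (stk, 0)).1, c + (xs.foldl stepB (stk, 0)).2) := by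
  induction xs generalizing stk c with
  | nil => simp
  | cons x xs ih =>
    by_cases hc : x = '0' ∧ isTop11 stk = true
    · simp only [List.foldl_cons, stepB, hc, and_self, if_pos]
      rw [ih _ (c + 1), ih _ (0 + 1)]
      simp; omega
    · simp only [List.foldl_cons, stepB, if_neg hc]
      exact ih _ c

-- running over the intercalation: each separator "110" is pushed-pushed-popped
theorem run_intercalate (ps : List (List Char)) (hps : ps ≠ []) (stk : List Char) (cnt : Int) :
    (List.intercalate ['1','1','0'] ps).foldl stepB (stk, cnt)
      = ((ps.flatten.foldl stepB (stk, 0)).1, cnt + (ps.length - 1) + (ps.flatten.foldl stepB (stk, 0)).2) := by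
  induction ps generalizing stk cnt with
  | nil => exact absurd rfl hps
  | cons p ps ih =>
    cases ps with
    | nil =>
      have h1 : List.intercalate ['1','1','0'] [p] = p := by
        simp [List.intercalate, List.intersperse]
      rw [h1, run_shift p stk cnt]
      simp
    | cons q ps' =>
      rw [intercalate_cons_ne, List.foldl_append, List.foldl_append, run_shift p stk cnt]
      set F := p.foldl stepB (stk, 0) with hF
      have h110 : (['1','1','0'] : List Char).foldl stepB (F.1, cnt + F.2) = (F.1, cnt + F.2 + 1) := by
        simp [stepB, isTop11]
      rw [h110, ih (by simp) F.1 (cnt + F.2 + 1)]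
      conv_rhs => rw [List.flatten_cons, List.foldl_append, run_shift (q :: ps').flatten]
      simp only [List.length_cons]
      refine Prod.ext rfl ?_
      push_cast
      ring

-- A's extraction loop computes exactly B's single stack pass
theorem extractA_eq_run (fuel : Nat) (frag : List Char) (cnt : Int) (hf : frag.length < 3 * fuel) :
    extract110A frag cnt fuel
      = ((frag.foldl stepB ([], 0)).1.reverse, cnt + (frag.foldl stepB ([], 0)).2) := by
  induction fuel generalizing frag cnt with
  | zero => omega
  | succ fuel ih0 =>
    rw [extract110A]
    by_cases h : (PySem.Chars.splitOn frag ['1','1','0']).length ≠ 1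
    · rw [if_pos h]
      have hJ : PySem.Chars.join [] (PySem.Chars.splitOn frag ['1','1','0'])
          = (sp110 frag []).flatten := by
        rw [splitOn110_eq, join_nil_eq_flatten]
      have hfrag : frag = List.intercalate ['1','1','0'] (sp110 frag []) := by
        simpa using (intercalate_sp110 frag []).symm
      have hrun := run_intercalate (sp110 frag []) (sp110_ne_nil frag []) [] 0
      rw [← hfrag] at hrun
      have hlt : (PySem.Chars.join [] (PySem.Chars.splitOn frag ['1','1','0'])).length
          < frag.length := join_split_lt frag h
      have hlen3 : (PySem.Chars.join [] (PySem.Chars.splitOn frag ['1','1','0'])).length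
          + 3 * ((PySem.Chars.splitOn frag ['1','1','0']).length - 1) = frag.length := by
        rw [splitOn110_eq, join_nil_eq_flatten]
        simpa using flatten_sp110_length frag []
      have hk : 2 ≤ (PySem.Chars.splitOn frag ['1','1','0']).length := by
        have h1 := List.length_pos_iff.mpr (sp110_ne_nil frag ([] : List Char))
        rw [← splitOn110_eq] at h1
        omega
      have hfuel : (PySem.Chars.join [] (PySem.Chars.splitOn frag ['1','1','0'])).length
          < 3 * fuel := by omega
      have ih2 := ih0 (PySem.Chars.join [] (PySem.Chars.splitOn frag ['1','1','0']))
        (cnt + (((PySem.Chars.splitOn frag ['1','1','0']).length : Int) - 1)) hfuel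
      rw [hJ, splitOn110_eq] at ih2 ⊢
      rw [ih2, hrun]
      refine Prod.ext rfl ?_
      dsimp only
      ring
    · rw [if_neg h]
      have h' : (sp110 frag []).length = 1 := by
        rw [← splitOn110_eq]
        omega
      have hirr := sp110_len_one h'
      have := run_irreducible frag [] 0 (by simpa using hirr)
      rw [this]
      simp

theorem isPrefixOf_zero_drop (frag : List Char) (k : Nat) :
    (['0'].isPrefixOf (frag.drop k)) = true ↔ frag[k]? = some '0' := by
  rw [← List.head?_drop]
  generalize frag.drop k = l
  cases l with
  | nil => simp [List.isPrefixOf]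
  | cons a t =>
    simp only [List.isPrefixOf, List.head?_cons, Option.some.injEq, Bool.and_eq_true,
      and_true, beq_iff_eq]
    exact ⟨fun h => h.symm, fun h => h.symm⟩

theorem rfind_go_eq_findCut (frag : List Char) (i : Nat) :
    PySem.Chars.rfind.go frag ['0'] i = (findCut frag (i + 1) : Int) - 1 := by
  induction i with
  | zero =>
    rw [PySem.Chars.rfind.go, findCut]
    by_cases h0 : frag[0]? = some '0'
    · have : (['0'].isPrefixOf frag) = true := by
        have := (isPrefixOf_zero_drop frag 0).mpr h0
        simpa using this
      rw [if_pos this, if_neg (by simp [h0])]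
      simp
    · have : ¬ ((['0'].isPrefixOf frag) = true) := by
        intro hp
        exact h0 ((isPrefixOf_zero_drop frag 0).mp (by simpa using hp))
      rw [if_neg this, if_pos (by simp [h0])]
      simp
  | succ j ihj =>
    rw [PySem.Chars.rfind.go]
    by_cases h0 : frag[j + 1]? = some '0'
    · rw [if_pos ((isPrefixOf_zero_drop frag (j + 1)).mpr h0)]
      conv_rhs => rw [findCut]
      rw [if_neg (by simp [h0])]
      push_cast
      ring
    · rw [if_neg (fun hp => h0 ((isPrefixOf_zero_drop frag (j + 1)).mp hp)), ihj]
      conv_rhs => rw [findCut]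
      rw [if_pos (by simp [h0])]

theorem rfind_eq_findCut (frag : List Char) :
    PySem.Chars.rfind frag ['0'] = (findCut frag frag.length : Int) - 1 := by
  rw [PySem.Chars.rfind, rfind_go_eq_findCut]
  have : findCut frag (frag.length + 1) = findCut frag frag.length := by
    rw [findCut, if_pos (by simp)]
  rw [this]

theorem insert110_eq (l : List Char) : insert110A l = insert110B l := by
  rw [insert110A, insert110B, extractA_eq_run (l.length + 1) l 0 (by omega)]
  dsimp only
  rw [rfind_eq_findCut, zero_add]
  set R := l.foldl stepB ([], 0) with hR
  set frag := R.1.reverse with hfrag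
  set i := findCut frag frag.length with hi
  by_cases h0 : i = 0
  · rw [if_pos (by rw [h0]; norm_num)]
    rw [h0]
    simp
  · rw [if_neg (by omega)]
    have h1 : (i : Int) - 1 + 1 = ((i : Nat) : Int) := by omega
    rw [h1]
    rw [PySem.Chars.slice_eq_listSlice, PySem.Chars.slice_eq_listSlice,
        PySem.List.slice_to_natCast, PySem.List.slice_from_natCast]

-- ===== VERDICT (by name: the statement is the Claim_ definition above) =====
theorem solution_spec : Claim_equal_solution := by
  intro s _
  unfold Spec_solution solution solution_alt
  simp [insert110_eq]
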